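-- pv_equiv track=rewrite | github.com/yuansheng0111/bot | util.py | find_continuous_pattern
-- ===== SOURCE A (Python) =====
-- def find_continuous_pattern(allowed_characters, text):
--     """
--     Find continuous pattern of allowed characters in text.
--
--     Args:
--         allowed_characters (str): The allowed characters.
--         text (str): The text to search in.
--
--     Returns:
--         str: The continuous pattern of allowed characters.
--     """
--     pattern = []
--     for char in text:
--         if char in allowed_characters:
--             pattern.append(char)
--         elif pattern:  # stop if the first invalid character is encountered after some valid ones
--             break
--     return ''.join(pattern)
-- ===== SOURCE B (Python) =====
-- def find_continuous_pattern(allowed_characters, text):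
--     # Decompose the whole text into its maximal runs of equal "allowedness",
--     # then select the first run whose characters are allowed.
--     runs = []          # finished maximal runs, as (is_allowed, list_of_chars)
--     cur = None         # the run currently being built, or None
--     for c in text:
--         k = c in allowed_characters
--         if cur is not None and cur[0] == k:
--             cur[1].append(c)
--         else:
--             if cur is not None:
--                 runs.append(cur)
--             cur = (k, [c])
--     if cur is not None:
--         runs.append(cur)
--     for k, chars in runs:
--         if k:
--             return ''.join(chars)
--     return ''
-- ===== Notes on version B (the rewrite author's own statement) =====
-- stated objective: alternative
-- what changed: B does not accumulate-and-break: it first decomposes the entire text into its maximal runs of equal allowedness (a groupby-style run-length grouping) and then selects the first allowed run from that decomposition.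
import Mathlib
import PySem

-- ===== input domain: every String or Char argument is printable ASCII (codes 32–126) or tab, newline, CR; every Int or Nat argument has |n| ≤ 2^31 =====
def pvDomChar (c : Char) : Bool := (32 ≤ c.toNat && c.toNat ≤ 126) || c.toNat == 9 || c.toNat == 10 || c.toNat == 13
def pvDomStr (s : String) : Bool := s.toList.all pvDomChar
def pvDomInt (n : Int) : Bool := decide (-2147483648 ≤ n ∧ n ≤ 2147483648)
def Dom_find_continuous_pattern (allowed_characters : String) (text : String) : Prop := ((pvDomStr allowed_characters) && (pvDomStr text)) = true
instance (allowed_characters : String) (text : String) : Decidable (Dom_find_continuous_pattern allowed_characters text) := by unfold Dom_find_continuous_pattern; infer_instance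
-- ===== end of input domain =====

-- B decomposes the whole text into maximal runs of equal allowedness and selects the first
-- allowed run, instead of A's accumulate-with-break loop; objective: alternative, same cost.

-- ===== PORT A =====
-- A's for-loop with append/break: structural recursion carrying the accumulator `pattern`.
-- `char in allowed_characters` for a one-char `char` is exactly element membership.
def fcpLoop (allowed : List Char) : List Char → List Char → List Char
  | pattern, [] => pattern
  | pattern, c :: rest =>
    if allowed.contains c then fcpLoop allowed (pattern ++ [c]) rest
    else if pattern ≠ [] then pattern
    else fcpLoop allowed pattern rest

def find_continuous_pattern (allowed_characters : String) (text : String) : String :=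
  String.ofList (fcpLoop allowed_characters.toList [] text.toList)

-- ===== PORT B =====
-- B's first loop: build the run decomposition (finished runs `runs`, run being built `cur`).
def runsLoop (allowed : List Char) :
    List (Bool × List Char) → Option (Bool × List Char) → List Char → List (Bool × List Char)
  | runs, cur, [] =>
    match cur with
    | none => runs
    | some r => runs ++ [r]
  | runs, cur, c :: rest =>
    let k := allowed.contains c
    match cur with
    | some (k', cs) =>
      if k' == k then runsLoop allowed runs (some (k', cs ++ [c])) rest
      else runsLoop allowed (runs ++ [(k', cs)]) (some (k, [c])) rest
    | none => runsLoop allowed runs (some (k, [c])) rest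

-- B's second loop: first run whose key is true, else ''.
def firstAllowedRun : List (Bool × List Char) → List Char
  | [] => []
  | (k, cs) :: rest => if k then cs else firstAllowedRun rest

def find_continuous_pattern_alt (allowed_characters : String) (text : String) : String :=
  String.ofList (firstAllowedRun (runsLoop allowed_characters.toList [] none text.toList))

-- ===== PRECONDITION & SPEC =====
def Spec_find_continuous_pattern (allowed_characters : String) (text : String) (out : String) : Prop := out = find_continuous_pattern_alt allowed_characters text
instance (allowed_characters : String) (text : String) (out : String) : Decidable (Spec_find_continuous_pattern allowed_characters text out) := by unfold Spec_find_continuous_pattern; infer_instance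

-- ===== CLAIM (what is proved, stated in full; the proofs are below) =====
def Claim_equal_find_continuous_pattern : Prop := ∀ (allowed_characters : String) (text : String), Dom_find_continuous_pattern allowed_characters text → Spec_find_continuous_pattern allowed_characters text (find_continuous_pattern allowed_characters text)

-- ===== LEMMAS AND PROOFS =====

-- A side: once the accumulator is nonempty, the loop appends the maximal allowed prefix of the rest.
theorem fcpLoop_nonempty (allowed : List Char) (l pattern : List Char) (h : pattern ≠ []) :
    fcpLoop allowed pattern l = pattern ++ l.takeWhile (fun c => allowed.contains c) := by
  induction l generalizing pattern with
  | nil => simp [fcpLoop]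
  | cons c rest ih =>
    by_cases hc : c ∈ allowed
    · have hne : pattern ++ [c] ≠ [] := by simp
      simp [fcpLoop, hc, ih _ hne, List.takeWhile]
    · simp [fcpLoop, hc, h, List.takeWhile]

-- A's result is the maximal allowed run after the leading disallowed run.
theorem fcpLoop_empty (allowed : List Char) (l : List Char) :
    fcpLoop allowed [] l =
      (l.dropWhile (fun c => !(allowed.contains c))).takeWhile (fun c => allowed.contains c) := by
  induction l with
  | nil => simp [fcpLoop]
  | cons c rest ih =>
    by_cases hc : c ∈ allowed
    · have := fcpLoop_nonempty allowed rest [c] (by simp)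
      simp [fcpLoop, hc, this, List.dropWhile]
    · simp [fcpLoop, hc, ih, List.dropWhile]

-- B side: finished runs are only ever appended to, so they factor out.
theorem runsLoop_append (allowed : List Char) (runs : List (Bool × List Char))
    (cur : Option (Bool × List Char)) (l : List Char) :
    runsLoop allowed runs cur l = runs ++ runsLoop allowed [] cur l := by
  induction l generalizing runs cur with
  | nil => cases cur <;> simp [runsLoop]
  | cons c rest ih =>
    match cur with
    | none => simp only [runsLoop]; rw [ih, ih []]
    | some (k', cs) =>
      simp only [runsLoop]
      by_cases hk : k' == allowed.contains c
      · simp only [hk, if_true]; rw [ih, ih []]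
      · simp only [hk, Bool.false_eq_true, if_false, List.nil_append]
        rw [ih (runs ++ [(k', cs)]), ih [(k', cs)], List.append_assoc]

-- Building inside a true run: the rest's allowed prefix is appended.
theorem firstAllowedRun_true (allowed : List Char) (cs : List Char) (l : List Char) :
    firstAllowedRun (runsLoop allowed [] (some (true, cs)) l) =
      cs ++ l.takeWhile (fun c => allowed.contains c) := by
  induction l generalizing cs with
  | nil => simp [runsLoop, firstAllowedRun]
  | cons c rest ih =>
    by_cases hc : c ∈ allowed
    · simp [runsLoop, hc, ih, List.takeWhile]
    · simp [runsLoop, hc, runsLoop_append allowed [(true, cs)], firstAllowedRun,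
        List.takeWhile]

-- Building inside a false run: the result is the first allowed run of the rest.
theorem firstAllowedRun_false (allowed : List Char) (cs : List Char) (l : List Char) :
    firstAllowedRun (runsLoop allowed [] (some (false, cs)) l) =
      (l.dropWhile (fun c => !(allowed.contains c))).takeWhile (fun c => allowed.contains c) := by
  induction l generalizing cs with
  | nil => simp [runsLoop, firstAllowedRun]
  | cons c rest ih =>
    by_cases hc : c ∈ allowed
    · simp [runsLoop, hc, runsLoop_append allowed [(false, cs)], firstAllowedRun,
        firstAllowedRun_true, List.dropWhile]
    · simp [runsLoop, hc, ih, List.dropWhile]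

-- B's result equals the same dropWhile/takeWhile characterisation.
theorem alt_char (allowed : List Char) (l : List Char) :
    firstAllowedRun (runsLoop allowed [] none l) =
      (l.dropWhile (fun c => !(allowed.contains c))).takeWhile (fun c => allowed.contains c) := by
  cases l with
  | nil => simp [runsLoop, firstAllowedRun]
  | cons c rest =>
    by_cases hc : c ∈ allowed
    · simp [runsLoop, hc, firstAllowedRun_true, List.dropWhile]
    · simp [runsLoop, hc, firstAllowedRun_false, List.dropWhile]

-- ===== VERDICT (by name: the statement is the Claim_ definition above) =====
theorem find_continuous_pattern_spec : Claim_equal_find_continuous_pattern := by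
  intro a t _
  unfold Spec_find_continuous_pattern find_continuous_pattern find_continuous_pattern_alt
  rw [fcpLoop_empty, alt_char]
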